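-- pv_equiv track=rewrite | github.com/vfmlucasguo/digital-provenance | scripts/process_aibom.py | _marker_in_comment
-- ===== SOURCE A (Python) =====
-- def _marker_in_comment(line: str, line_lower: str) -> bool:
--     """Return True if any AI marker on this line appears after a comment delimiter.
--     Prevents false positives when the marker appears in string literals or HTML text.
--     Supported delimiters: // /* <!-- #
--     """
--     for marker in ('@ai-generated', '@generated-ai'):
--         pos = line_lower.find(marker)
--         if pos == -1:
--             continue
--         before = line[:pos]
--         if ('//' in before or '/*' in before or '<!--' in before or
--                 before.lstrip().startswith('#') or before.lstrip().startswith('*')):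
--             return True
--     return False
-- ===== SOURCE B (Python) =====
-- def _marker_in_comment(line: str, line_lower: str) -> bool:
--     # Find the earliest point at which a comment provably starts, then just
--     # compare marker positions against it.
--     bounds = [line.find(d) + len(d) for d in ('//', '/*', '<!--') if line.find(d) != -1]
--     stripped = line.lstrip()
--     if stripped.startswith('#') or stripped.startswith('*'):
--         bounds.append(len(line) - len(stripped) + 1)
--     if not bounds:
--         return False
--     m = min(bounds)
--     return any(line_lower.find(mk) >= m for mk in ('@ai-generated', '@generated-ai'))
-- ===== Notes on version B (the rewrite author's own statement) =====
-- stated objective: alternative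
-- what changed: A slices the line before each marker and substring-scans that prefix for every delimiter per marker; B computes the earliest comment-start boundary once (first-occurrence end positions of '//', '/*', '<!--' plus the first non-whitespace position when it is '#' or '*') and then just compares each marker's find position against that single minimum.
import Mathlib
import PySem

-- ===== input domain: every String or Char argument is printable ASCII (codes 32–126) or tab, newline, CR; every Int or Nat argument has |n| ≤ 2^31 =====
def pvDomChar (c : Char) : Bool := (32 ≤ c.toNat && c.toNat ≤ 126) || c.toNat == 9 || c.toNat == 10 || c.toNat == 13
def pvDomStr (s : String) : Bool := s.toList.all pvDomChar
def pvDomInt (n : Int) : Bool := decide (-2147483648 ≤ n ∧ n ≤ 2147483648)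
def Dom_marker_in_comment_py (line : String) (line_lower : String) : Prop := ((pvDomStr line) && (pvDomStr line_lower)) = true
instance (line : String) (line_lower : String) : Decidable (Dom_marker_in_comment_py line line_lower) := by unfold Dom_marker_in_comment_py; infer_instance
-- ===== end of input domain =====

-- B restructures A's per-marker prefix scans into one pass that computes the earliest
-- comment-start boundary and then compares each marker position against it (objective:
-- alternative decomposition; same behaviour on all inputs, both functions are total).

-- ===== PORT A =====
-- the per-marker body of A's loop: 'before = line[:pos]' and the five delimiter tests
def pvACond (line : String) (pos : Int) : Bool :=
  let before := PySem.Str.slice line none (some pos)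
  PySem.Str.isIn "//" before || PySem.Str.isIn "/*" before || PySem.Str.isIn "<!--" before ||
    PySem.Str.startswith (PySem.Str.lstrip before) "#" ||
    PySem.Str.startswith (PySem.Str.lstrip before) "*"

def marker_in_comment_py (line : String) (line_lower : String) : Bool :=
  (["@ai-generated", "@generated-ai"] : List String).any (fun marker =>
    let pos := PySem.Str.find line_lower marker
    if pos = -1 then false else pvACond line pos)

-- ===== PORT B =====
-- Source B: bounds = [line.find(d)+len(d) for d in (…) if line.find(d) != -1]  (+ the '#'/'*' rule)
def pvBounds (line : String) : List Int :=
  let base := (["//", "/*", "<!--"] : List String).filterMap (fun d =>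
    if PySem.Str.find line d = -1 then none
    else some (PySem.Str.find line d + PySem.Str.len d))
  let stripped := PySem.Str.lstrip line
  if PySem.Str.startswith stripped "#" || PySem.Str.startswith stripped "*" then
    base ++ [PySem.Str.len line - PySem.Str.len stripped + 1]
  else base

def marker_in_comment_py_alt (line : String) (line_lower : String) : Bool :=
  match PySem.List.min? (pvBounds line) (fun x => x) with
  | none => false
  | some m => (["@ai-generated", "@generated-ai"] : List String).any
      (fun mk => m ≤ PySem.Str.find line_lower mk)

-- ===== PRECONDITION & SPEC =====
def Spec_marker_in_comment_py (line : String) (line_lower : String) (out : Bool) : Prop := out = marker_in_comment_py_alt line line_lower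
instance (line : String) (line_lower : String) (out : Bool) : Decidable (Spec_marker_in_comment_py line line_lower out) := by unfold Spec_marker_in_comment_py; infer_instance

-- ===== CLAIM (what is proved, stated in full; the proofs are below) =====
def Claim_equal_marker_in_comment_py : Prop := ∀ (line : String) (line_lower : String), Dom_marker_in_comment_py line line_lower → Spec_marker_in_comment_py line line_lower (marker_in_comment_py line line_lower)

-- ===== LEMMAS AND PROOFS =====

-- 'sub in s[:n]' ↔ the FIRST occurrence of sub in s ends at or before n
lemma pv_isIn_take_iff (s sub : List Char) (n : Nat) :
    PySem.Chars.isIn sub (List.take n s) = true ↔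
      0 ≤ PySem.Chars.find s sub ∧ PySem.Chars.find s sub + sub.length ≤ n := by
  by_cases hsub : sub = []
  · subst hsub
    simp only [PySem.Chars.isIn_nil, PySem.Chars.find_nil, List.length_nil, Nat.cast_zero,
      add_zero, le_refl, true_and, true_iff]
    exact Int.natCast_nonneg n
  · have hlen1 : 0 < sub.length := by cases sub <;> simp_all
    constructor
    · intro h
      obtain ⟨j, hj⟩ := (PySem.Chars.exists_prefix_drop_iff_isIn sub (List.take n s)).2 h
      rw [List.drop_take, List.prefix_take_iff] at hj
      have hinf : sub <:+: s := hj.1.isInfix.trans (List.drop_suffix j s).isInfix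
      have hnn : 0 ≤ PySem.Chars.find s sub := (PySem.Chars.find_nonneg_iff s sub).2 hinf
      obtain ⟨-, hmin⟩ := PySem.Chars.find_spec hnn
      have hle : (PySem.Chars.find s sub).toNat ≤ j := by
        by_contra hlt
        exact hmin j (by omega) hj.1
      have h2 := hj.2
      refine ⟨hnn, ?_⟩
      omega
    · rintro ⟨hnn, hle⟩
      obtain ⟨hpre, -⟩ := PySem.Chars.find_spec hnn
      refine (PySem.Chars.exists_prefix_drop_iff_isIn sub (List.take n s)).1
        ⟨(PySem.Chars.find s sub).toNat, ?_⟩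
      rw [List.drop_take, List.prefix_take_iff]
      exact ⟨hpre, by omega⟩

-- 'line[:n].lstrip().startswith(c)' ↔ line's first non-whitespace char is c and lies before n
lemma pv_lstrip_take_startswith (s : List Char) (n : Nat) (c : Char) :
    PySem.Chars.startswith (PySem.Chars.lstrip (List.take n s)) [c] = true ↔
      (PySem.Chars.startswith (PySem.Chars.lstrip s) [c] = true ∧
        s.length - (PySem.Chars.lstrip s).length + 1 ≤ n) := by
  induction s generalizing n with
  | nil => simp [PySem.Chars.lstrip, PySem.Chars.startswith_iff]
  | cons a t ih =>
    cases n with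
    | zero =>
      simp only [List.take_zero, PySem.Chars.lstrip, List.dropWhile_nil,
        PySem.Chars.startswith_iff]
      constructor
      · intro h; exact absurd h (by simp)
      · rintro ⟨-, h2⟩; omega
    | succ m =>
      by_cases hsp : PySem.Chars.isspace a = true
      · have hlen : (List.dropWhile PySem.Chars.isspace t).length ≤ t.length :=
          List.length_dropWhile_le _ _
        have iht := ih m
        simp only [PySem.Chars.lstrip] at iht ⊢
        rw [List.take_succ_cons, List.dropWhile_cons, if_pos hsp, List.dropWhile_cons,
          if_pos hsp, iht, List.length_cons]
        constructor
        · rintro ⟨h1, h2⟩; exact ⟨h1, by omega⟩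
        · rintro ⟨h1, h2⟩; exact ⟨h1, by omega⟩
      · simp only [PySem.Chars.lstrip]
        rw [List.take_succ_cons, List.dropWhile_cons, if_neg hsp, List.dropWhile_cons,
          if_neg hsp]
        simp [PySem.Chars.startswith_iff, List.cons_prefix_cons]

-- 'm = min(bounds); m ≤ pos' (with empty bounds giving False) is 'some bound is ≤ pos'
lemma pv_min_le_iff (bs : List Int) (pos : Int) :
    (match PySem.List.min? bs (fun x => x) with
      | none => false
      | some m => decide (m ≤ pos)) = decide (∃ b ∈ bs, b ≤ pos) := by
  cases h : PySem.List.min? bs (fun x => x) with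
  | none =>
    rw [PySem.List.min?_eq_none_iff] at h
    subst h; simp
  | some m =>
    have hmem := PySem.List.min?_mem h
    have hmin := PySem.List.min?_isMin h
    by_cases hle : m ≤ pos
    · simp only [hle, decide_true]
      exact (decide_eq_true ⟨m, hmem, hle⟩).symm
    · simp only [hle, decide_false]
      refine (decide_eq_false ?_).symm
      rintro ⟨b, hb, hbpos⟩
      exact hle (le_trans (hmin b hb) hbpos)

-- membership in B's bounds list: the three delimiter boundaries
lemma pv_mem_base_iff (line : String) (b : Int) :
    b ∈ (["//", "/*", "<!--"] : List String).filterMap (fun d =>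
      if PySem.Str.find line d = -1 then none
      else some (PySem.Str.find line d + PySem.Str.len d)) ↔
      ((PySem.Str.find line "//" ≠ -1 ∧ b = PySem.Str.find line "//" + 2) ∨
       (PySem.Str.find line "/*" ≠ -1 ∧ b = PySem.Str.find line "/*" + 2) ∨
       (PySem.Str.find line "<!--" ≠ -1 ∧ b = PySem.Str.find line "<!--" + 4)) := by
  have l1 : PySem.Str.len "//" = 2 := by decide
  have l2 : PySem.Str.len "/*" = 2 := by decide
  have l3 : PySem.Str.len "<!--" = 4 := by decide
  simp only [List.mem_filterMap, List.mem_cons, List.not_mem_nil, or_false]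
  constructor
  · rintro ⟨d, (rfl | rfl | rfl), hx⟩ <;>
      split_ifs at hx with h <;>
      simp only [Option.some.injEq] at hx <;>
      first
        | exact Or.inl ⟨h, by omega⟩
        | exact Or.inr (Or.inl ⟨h, by omega⟩)
        | exact Or.inr (Or.inr ⟨h, by omega⟩)
  · rintro (⟨h, rfl⟩ | ⟨h, rfl⟩ | ⟨h, rfl⟩)
    · exact ⟨"//", Or.inl rfl, by rw [if_neg h, l1]⟩
    · exact ⟨"/*", Or.inr (Or.inl rfl), by rw [if_neg h, l2]⟩
    · exact ⟨"<!--", Or.inr (Or.inr rfl), by rw [if_neg h, l3]⟩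

-- membership in B's bounds list, spelled out
lemma pv_mem_bounds_iff (line : String) (b : Int) :
    b ∈ pvBounds line ↔
      ((PySem.Str.find line "//" ≠ -1 ∧ b = PySem.Str.find line "//" + 2) ∨
       (PySem.Str.find line "/*" ≠ -1 ∧ b = PySem.Str.find line "/*" + 2) ∨
       (PySem.Str.find line "<!--" ≠ -1 ∧ b = PySem.Str.find line "<!--" + 4) ∨
       ((PySem.Str.startswith (PySem.Str.lstrip line) "#" ||
         PySem.Str.startswith (PySem.Str.lstrip line) "*") = true ∧
         b = PySem.Str.len line - PySem.Str.len (PySem.Str.lstrip line) + 1)) := by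
  unfold pvBounds
  by_cases h4 : (PySem.Str.startswith (PySem.Str.lstrip line) "#" ||
      PySem.Str.startswith (PySem.Str.lstrip line) "*") = true
  · rw [if_pos h4, List.mem_append, pv_mem_base_iff, List.mem_singleton]
    constructor
    · rintro ((h | h | h) | h)
      · exact Or.inl h
      · exact Or.inr (Or.inl h)
      · exact Or.inr (Or.inr (Or.inl h))
      · exact Or.inr (Or.inr (Or.inr ⟨h4, h⟩))
    · rintro (h | h | h | ⟨-, h⟩)
      · exact Or.inl (Or.inl h)
      · exact Or.inl (Or.inr (Or.inl h))
      · exact Or.inl (Or.inr (Or.inr h))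
      · exact Or.inr h
  · rw [if_neg h4, pv_mem_base_iff]
    constructor
    · rintro (h | h | h)
      · exact Or.inl h
      · exact Or.inr (Or.inl h)
      · exact Or.inr (Or.inr (Or.inl h))
    · rintro (h | h | h | ⟨hc, -⟩)
      · exact Or.inl h
      · exact Or.inr (Or.inl h)
      · exact Or.inr (Or.inr h)
      · exact absurd hc h4

-- the per-marker step of A equals B's boundary comparison
lemma pv_perMarker (line : String) (pos : Int) (hpos : -1 ≤ pos) :
    (if pos = -1 then false else pvACond line pos) =
      (match PySem.List.min? (pvBounds line) (fun x => x) with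
        | none => false
        | some m => decide (m ≤ pos)) := by
  rw [pv_min_le_iff]
  have hf1 := PySem.Chars.neg_one_le_find line.toList "//".toList
  have hf2 := PySem.Chars.neg_one_le_find line.toList "/*".toList
  have hf3 := PySem.Chars.neg_one_le_find line.toList "<!--".toList
  have hlenle : (List.dropWhile PySem.Chars.isspace line.toList).length ≤ line.toList.length :=
    List.length_dropWhile_le _ _
  have hexists : (∃ b ∈ pvBounds line, b ≤ pos) ↔
      ((PySem.Str.find line "//" ≠ -1 ∧ PySem.Str.find line "//" + 2 ≤ pos) ∨
       (PySem.Str.find line "/*" ≠ -1 ∧ PySem.Str.find line "/*" + 2 ≤ pos) ∨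
       (PySem.Str.find line "<!--" ≠ -1 ∧ PySem.Str.find line "<!--" + 4 ≤ pos) ∨
       ((PySem.Str.startswith (PySem.Str.lstrip line) "#" ||
         PySem.Str.startswith (PySem.Str.lstrip line) "*") = true ∧
         PySem.Str.len line - PySem.Str.len (PySem.Str.lstrip line) + 1 ≤ pos)) := by
    constructor
    · rintro ⟨b, hb, hble⟩
      rcases (pv_mem_bounds_iff line b).1 hb with ⟨hc, rfl⟩ | ⟨hc, rfl⟩ | ⟨hc, rfl⟩ | ⟨hc, rfl⟩
      · exact Or.inl ⟨hc, hble⟩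
      · exact Or.inr (Or.inl ⟨hc, hble⟩)
      · exact Or.inr (Or.inr (Or.inl ⟨hc, hble⟩))
      · exact Or.inr (Or.inr (Or.inr ⟨hc, hble⟩))
    · rintro (⟨hc, hle⟩ | ⟨hc, hle⟩ | ⟨hc, hle⟩ | ⟨hc, hle⟩)
      · exact ⟨_, (pv_mem_bounds_iff line _).2 (Or.inl ⟨hc, rfl⟩), hle⟩
      · exact ⟨_, (pv_mem_bounds_iff line _).2 (Or.inr (Or.inl ⟨hc, rfl⟩)), hle⟩
      · exact ⟨_, (pv_mem_bounds_iff line _).2 (Or.inr (Or.inr (Or.inl ⟨hc, rfl⟩))), hle⟩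
      · exact ⟨_, (pv_mem_bounds_iff line _).2 (Or.inr (Or.inr (Or.inr ⟨hc, rfl⟩))), hle⟩
  by_cases hneg : pos = -1
  · subst hneg
    rw [if_pos rfl]
    refine (decide_eq_false ?_).symm
    rw [hexists]
    rintro (⟨hc, hle⟩ | ⟨hc, hle⟩ | ⟨hc, hle⟩ | ⟨hc, hle⟩) <;>
      simp only [PySem.Str.find, PySem.Str.len, PySem.Str.toList_lstrip,
        PySem.Chars.lstrip] at hc hle ⊢ <;> omega
  · have hnn : 0 ≤ pos := by omega
    rw [if_neg hneg, eq_comm, Bool.eq_iff_iff, decide_eq_true_iff, hexists]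
    have hslice : (PySem.Str.slice line none (some pos)).toList =
        List.take pos.toNat line.toList := by
      simp only [PySem.Str.toList_slice, PySem.Chars.slice_eq_listSlice]
      exact PySem.List.slice_to line.toList hnn
    have hhash : ("#" : String).toList = ['#'] := by decide
    have hstar : ("*" : String).toList = ['*'] := by decide
    have e1 : ("//" : String).toList.length = 2 := by decide
    have e2 : ("/*" : String).toList.length = 2 := by decide
    have e3 : ("<!--" : String).toList.length = 4 := by decide
    have hposn : (pos.toNat : Int) = pos := Int.toNat_of_nonneg hnn
    rw [Iff.comm]
    simp only [pvACond, PySem.Str.isIn, PySem.Str.startswith, PySem.Str.toList_lstrip,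
      PySem.Str.find, PySem.Str.len, hslice, hhash, hstar,
      Bool.or_eq_true, pv_isIn_take_iff, pv_lstrip_take_startswith]
    simp only [PySem.Chars.lstrip]
    constructor
    · rintro ((((⟨ha, hb⟩ | ⟨ha, hb⟩) | ⟨ha, hb⟩) | ⟨ha, hb⟩) | ⟨ha, hb⟩)
      · exact Or.inl ⟨by omega, by omega⟩
      · exact Or.inr (Or.inl ⟨by omega, by omega⟩)
      · exact Or.inr (Or.inr (Or.inl ⟨by omega, by omega⟩))
      · exact Or.inr (Or.inr (Or.inr ⟨Or.inl ha, by omega⟩))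
      · exact Or.inr (Or.inr (Or.inr ⟨Or.inr ha, by omega⟩))
    · rintro (⟨ha, hb⟩ | ⟨ha, hb⟩ | ⟨ha, hb⟩ | ⟨(hs | hs), hb⟩)
      · exact Or.inl (Or.inl (Or.inl (Or.inl ⟨by omega, by omega⟩)))
      · exact Or.inl (Or.inl (Or.inl (Or.inr ⟨by omega, by omega⟩)))
      · exact Or.inl (Or.inl (Or.inr ⟨by omega, by omega⟩))
      · exact Or.inl (Or.inr ⟨hs, by omega⟩)
      · exact Or.inr ⟨hs, by omega⟩

-- ===== VERDICT (by name: the statement is the Claim_ definition above) =====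
theorem marker_in_comment_py_spec : Claim_equal_marker_in_comment_py := by
  intro line line_lower _
  show marker_in_comment_py line line_lower = marker_in_comment_py_alt line line_lower
  have hpush :
      marker_in_comment_py_alt line line_lower =
      (["@ai-generated", "@generated-ai"] : List String).any (fun mk =>
        match PySem.List.min? (pvBounds line) (fun x => x) with
        | none => false
        | some m => decide (m ≤ PySem.Str.find line_lower mk)) := by
    unfold marker_in_comment_py_alt
    cases PySem.List.min? (pvBounds line) (fun x => x) <;> simp
  rw [hpush]
  simp only [marker_in_comment_py, List.any_cons, List.any_nil, Bool.or_false]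
  have hins : ∀ mk : String, (-1 : Int) ≤ PySem.Str.find line_lower mk := fun mk =>
    PySem.Chars.neg_one_le_find line_lower.toList mk.toList
  rw [pv_perMarker line _ (hins "@ai-generated"), pv_perMarker line _ (hins "@generated-ai")]
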